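-- pv_equiv track=rewrite | github.com/Gadisa21/Competitive_Programming | onboard/week_1/largest-3-same-digit-number-in-string.py | largestGoodInteger
-- ===== SOURCE A (Python) =====
-- def largestGoodInteger(num):
--     left,right=0,0
--     res=float("-inf")
--     dic={}
--     while right<len(num):
--         dic[num[right]]=dic.get(num[right],0)+1
--         if right-left+1==3:
--             if len(dic)==1:
--                 res=max(res,int(num[right]))
--             dic[num[left]]-=1
--             if dic[num[left]]==0:
--                 del dic[num[left]]
--             left+=1
--         right+=1
--     if res==float("-inf"):
--         return ""
--     else:
--         return str(res)+str(res)+str(res)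
-- ===== SOURCE B (Python) =====
-- def largestGoodInteger(num):
--     for d in "9876543210":
--         cand = d * 3
--         if cand in num:
--             return cand
--     return ""
-- ===== Notes on version B (the rewrite author's own statement) =====
-- stated objective: idiomatic
-- what changed: Replaces the sliding-window scan with counter dict by generating the ten candidate digit triples in descending order and returning the first one that is a substring of num.
import Mathlib
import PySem

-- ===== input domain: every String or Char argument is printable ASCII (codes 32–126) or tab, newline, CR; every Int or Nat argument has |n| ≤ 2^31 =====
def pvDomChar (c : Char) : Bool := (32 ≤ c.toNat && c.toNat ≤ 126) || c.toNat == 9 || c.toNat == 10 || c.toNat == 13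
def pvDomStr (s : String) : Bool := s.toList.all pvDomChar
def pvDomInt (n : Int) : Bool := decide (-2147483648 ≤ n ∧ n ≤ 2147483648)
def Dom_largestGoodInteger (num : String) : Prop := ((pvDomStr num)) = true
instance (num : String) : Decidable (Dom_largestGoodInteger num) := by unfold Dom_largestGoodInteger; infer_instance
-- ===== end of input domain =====

-- B replaces A's sliding-window/counter scan with descending candidate-triple generation plus
-- substring membership (idiomatic); equal return values are proved on Pre_ (A raises ValueError
-- outside it).

-- ===== PORT A =====
-- max(res, v) where res is -inf (none) or a number
def pvOmax (res : Option Int) (v : Int) : Int :=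
  match res with
  | none => v
  | some r => max r v

-- the while loop of A; left/right/res/dic are the loop state, res = none models float("-inf").
-- num[right] / num[left] are read with getD: both indices are < len(num) whenever they are read,
-- so the default is never used.  int(num[right]) is PySem.Int.ofChars? [c]; under Pre_ the window
-- char is a digit so int() succeeds and the .getD 0 default is never reached.
def pvLoopA (l : List Char) (left right : Nat) (res : Option Int) (dic : PySem.Dict Char Int) :
    Option Int :=
  if _h : right < l.length then
    let c := l.getD right ' '
    let dic1 := dic.insert c (dic.getD c 0 + 1)
    if right - left + 1 = 3 then
      let res1 := if dic1.size = 1 then some (pvOmax res ((PySem.Int.ofChars? [c]).getD 0)) else res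
      let cl := l.getD left ' '
      let dic2 := dic1.insert cl (dic1.getD cl 0 - 1)
      let dic3 := if dic2.getD cl 0 = 0 then dic2.erase cl else dic2
      pvLoopA l (left + 1) (right + 1) res1 dic3
    else
      pvLoopA l left (right + 1) res dic1
  else res
termination_by l.length - right

def largestGoodInteger (num : String) : String :=
  match pvLoopA num.toList 0 0 none PySem.Dict.empty with
  | none => ""
  | some r => String.ofList (PySem.Int.toChars r ++ PySem.Int.toChars r ++ PySem.Int.toChars r)

-- ===== PORT B =====
-- for d in "9876543210": if d*3 in num: return d*3
def pvLoopB (num : List Char) : List Char → String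
  | [] => ""
  | d :: ds => if PySem.Chars.isIn [d, d, d] num then String.ofList [d, d, d] else pvLoopB num ds

def largestGoodInteger_alt (num : String) : String :=
  pvLoopB num.toList "9876543210".toList

-- ===== PRECONDITION & SPEC =====
-- true iff no three identical consecutive characters are non-digits (A calls int() on such a char)
def pvNoBadTriple : List Char → Bool
  | a :: b :: c :: t => !(a == b && b == c && !c.isDigit) && pvNoBadTriple (b :: c :: t)
  | _ => true

-- Pre_ excludes exactly the inputs on which A raises ValueError: strings with a run of three
-- identical consecutive non-digit characters.
def Pre_largestGoodInteger (num : String) : Prop := pvNoBadTriple num.toList = true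
instance (num : String) : Decidable (Pre_largestGoodInteger num) := by
  unfold Pre_largestGoodInteger; infer_instance

def pvWitness_largestGoodInteger : String := "a6777133339b"

def Spec_largestGoodInteger (num : String) (out : String) : Prop := out = largestGoodInteger_alt num
instance (num : String) (out : String) : Decidable (Spec_largestGoodInteger num out) := by
  unfold Spec_largestGoodInteger; infer_instance

-- ===== CLAIM (what is proved, stated in full; the proofs are below) =====
def Claim_equal_largestGoodInteger : Prop := ∀ (num : String), Dom_largestGoodInteger num →
  Pre_largestGoodInteger num → Spec_largestGoodInteger num (largestGoodInteger num)

-- ===== LEMMAS AND PROOFS =====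

-- value of int(c) for a window char, as A computes it
def pvDval (c : Char) : Int := (PySem.Int.ofChars? [c]).getD 0

-- the pure sliding-window scan A's loop implements
def pvScan (res : Option Int) : List Char → Option Int
  | a :: b :: c :: t =>
      pvScan (if a = b ∧ b = c then some (pvOmax res (pvDval c)) else res) (b :: c :: t)
  | _ => res
termination_by l => l.length

-- chars closing an all-equal window of three, in scan order
def pvTri : List Char → List Char
  | a :: b :: c :: t => (if a = b ∧ b = c then [c] else []) ++ pvTri (b :: c :: t)
  | _ => []
termination_by l => l.length

-- the shapes A's dict can have at the top of the loop once the window holds the two chars a, b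
def pvIsWin (dic : PySem.Dict Char Int) (a b : Char) : Prop :=
  if a = b then dic.items = [(a, 2)]
  else dic.items = [(a, 1), (b, 1)] ∨ dic.items = [(b, 1), (a, 1)]

theorem pvStepWin (a b c : Char) (dic : PySem.Dict Char Int) (h : pvIsWin dic a b) :
    ((dic.insert c (dic.getD c 0 + 1)).size = 1 ↔ (a = b ∧ b = c)) ∧
    pvIsWin
      (let d1 := dic.insert c (dic.getD c 0 + 1)
       let d2 := d1.insert a (d1.getD a 0 - 1)
       if d2.getD a 0 = 0 then d2.erase a else d2) b c := by
  unfold pvIsWin at h ⊢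
  obtain ⟨items, rfl⟩ : ∃ it, dic = PySem.Dict.mk it := ⟨dic.items, rfl⟩
  by_cases hab : a = b <;> simp only [hab, if_true] at h
  · subst hab; subst h
    by_cases hac : a = c <;>
      simp_all [PySem.Dict.insert, PySem.Dict.contains, PySem.Dict.getD, PySem.Dict.get?,
        PySem.Dict.size, PySem.Dict.erase, ne_comm]
  · rcases h with h | h <;> subst h <;>
      by_cases hac : a = c <;> by_cases hbc : b = c <;>
      simp_all [PySem.Dict.insert, PySem.Dict.contains, PySem.Dict.getD, PySem.Dict.get?,
        PySem.Dict.size, PySem.Dict.erase, ne_comm]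
    all_goals try simp_all [PySem.Dict.get?, PySem.Dict.erase,
      show ¬c = a from fun h => hac h.symm]
    all_goals try simp_all [show ¬b = a from fun h => hab h.symm]
    all_goals exact fun h => hac h.symm

theorem pvGetD_of_drop (l : List Char) (i j : Nat) (t : List Char) (hd : l.drop i = t)
    (c : Char) (hc : t[j]? = some c) : l.getD (i + j) ' ' = c := by
  have h1 : (List.drop i l)[j]? = l[i + j]? := List.getElem?_drop
  rw [hd, hc] at h1
  simp [List.getD_eq_getElem?_getD, ← h1]

theorem pvSteady (t : List Char) : ∀ (l : List Char) (left : Nat) (a b : Char)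
    (res : Option Int) (dic : PySem.Dict Char Int),
    l.drop left = a :: b :: t → pvIsWin dic a b →
    pvLoopA l left (left + 2) res dic = pvScan res (a :: b :: t) := by
  induction t with
  | nil =>
    intro l left a b res dic hd _hw
    have hlen : l.length = left + 2 := by
      have h1 := congrArg List.length hd
      have h2 := List.length_drop (l := l) (i := left)
      simp only [h2] at h1
      simp at h1
      omega
    rw [pvLoopA]
    rw [dif_neg (by omega)]
    rw [pvScan.eq_def]
  | cons c t' ih =>
    intro l left a b res dic hd hw
    have hlen : left + 2 < l.length := by
      have h1 := congrArg List.length hd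
      have h2 := List.length_drop (l := l) (i := left)
      simp only [h2] at h1
      simp at h1
      omega
    have hc : l.getD (left + 2) ' ' = c := pvGetD_of_drop l left 2 _ hd c (by simp)
    have ha : l.getD (left + 0) ' ' = a := pvGetD_of_drop l left 0 _ hd a (by simp)
    simp only [Nat.add_zero] at ha
    have hd' : l.drop (left + 1) = b :: c :: t' := by
      have : l.drop (left + 1) = (l.drop left).drop 1 := by
        rw [List.drop_drop]
      rw [this, hd]; rfl
    obtain ⟨hsize, hwin'⟩ := pvStepWin a b c dic hw
    rw [pvLoopA]
    rw [dif_pos hlen]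
    simp only [hc, ha]
    rw [if_pos (by omega : left + 2 - left + 1 = 3)]
    rw [pvScan]
    have hres : (if (dic.insert c (dic.getD c 0 + 1)).size = 1
        then some (pvOmax res ((PySem.Int.ofChars? [c]).getD 0)) else res) =
        (if a = b ∧ b = c then some (pvOmax res (pvDval c)) else res) := by
      rw [pvDval]
      exact if_congr hsize rfl rfl
    rw [hres]
    exact ih l (left + 1) b c _ _ hd' hwin'

theorem pvLoopA_eq_scan (l : List Char) : pvLoopA l 0 0 none PySem.Dict.empty = pvScan none l := by
  match l with
  | [] => rw [pvLoopA]; simp [pvScan]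
  | [a] =>
    rw [pvLoopA]
    rw [dif_pos (by simp)]
    rw [if_neg (by omega)]
    rw [pvLoopA]
    rw [dif_neg (by simp)]
    simp [pvScan]
  | a :: b :: t =>
    rw [pvLoopA]
    rw [dif_pos (by simp)]
    rw [if_neg (by omega)]
    rw [pvLoopA]
    rw [dif_pos (by simp)]
    rw [if_neg (by omega)]
    have hga : (a :: b :: t).getD 0 ' ' = a := rfl
    have hgb : (a :: b :: t).getD 1 ' ' = b := rfl
    rw [hga, hgb]
    have hwin : pvIsWin ((PySem.Dict.empty.insert a (PySem.Dict.empty.getD a 0 + 1)).insert b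
        ((PySem.Dict.empty.insert a (PySem.Dict.empty.getD a 0 + 1)).getD b 0 + 1)) a b := by
      unfold pvIsWin
      by_cases hab : a = b
      · subst hab
        simp [PySem.Dict.empty, PySem.Dict.insert, PySem.Dict.contains, PySem.Dict.getD,
          PySem.Dict.get?]
      · simp [hab, PySem.Dict.empty, PySem.Dict.insert, PySem.Dict.contains, PySem.Dict.getD,
          PySem.Dict.get?, show ¬b = a from fun h => hab h.symm]
    exact pvSteady t (a :: b :: t) 0 a b none _ rfl hwin

theorem pvScan_eq_foldl (l : List Char) : ∀ res, pvScan res l =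
    (pvTri l).foldl (fun r c => some (pvOmax r (pvDval c))) res := by
  induction l using pvTri.induct with
  | case1 a b c t ih =>
    intro res
    rw [pvScan, pvTri]
    rw [List.foldl_append]
    rw [ih]
    congr 1
    by_cases h : a = b ∧ b = c <;> simp [h]
  | case2 l h => intro res; rw [pvScan.eq_def, pvTri.eq_def]; cases l with
    | nil => rfl
    | cons a t => cases t with
      | nil => rfl
      | cons b t' => cases t' with
        | nil => rfl
        | cons c t'' => exact absurd rfl (h a b c t'')

theorem pvMem_tri_iff (l : List Char) (c : Char) : c ∈ pvTri l ↔ [c, c, c] <:+: l := by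
  induction l using pvTri.induct with
  | case1 a b c' t ih =>
    rw [pvTri]
    constructor
    · intro hm
      rcases List.mem_append.mp hm with hm | hm
      · by_cases h : a = b ∧ b = c'
        · simp [h] at hm
          subst hm
          obtain ⟨rfl, rfl⟩ := h
          exact List.IsPrefix.isInfix ⟨t, rfl⟩
        · simp [h] at hm
      · exact List.infix_cons (ih.mp hm)
    · intro hi
      rcases (List.infix_cons_iff.mp hi) with hp | hi'
      · obtain ⟨t', ht'⟩ := hp
        simp at ht'
        obtain ⟨rfl, rfl, rfl, _⟩ := ht'
        simp
      · exact List.mem_append.mpr (Or.inr (ih.mpr hi'))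
  | case2 l h =>
    rw [pvTri.eq_def]
    constructor
    · intro hm
      cases l with
      | nil => simp at hm
      | cons a t => cases t with
        | nil => simp at hm
        | cons b t' => cases t' with
          | nil => simp at hm
          | cons c'' t'' => exact absurd rfl (h a b c'' t'')
    · intro hi
      have := hi.length_le
      cases l with
      | nil => simp at this
      | cons a t => cases t with
        | nil => simp at this
        | cons b t' => cases t' with
          | nil => simp at this
          | cons c'' t'' => exact absurd rfl (h a b c'' t'')

theorem pvTri_digits (l : List Char) (h : pvNoBadTriple l = true) :
    ∀ c ∈ pvTri l, c.isDigit = true := by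
  induction l using pvTri.induct with
  | case1 a b c t ih =>
    rw [pvNoBadTriple] at h
    simp only [Bool.and_eq_true] at h
    intro x hx
    rw [pvTri] at hx
    rcases List.mem_append.mp hx with hm | hm
    · by_cases hh : a = b ∧ b = c
      · simp [hh] at hm
        subst hm
        obtain ⟨rfl, rfl⟩ := hh
        simpa using h.1
      · simp [hh] at hm
    · exact ih h.2 x hm
  | case2 l hno =>
    intro x hx
    rw [pvTri.eq_def] at hx
    cases l with
    | nil => simp at hx
    | cons a t => cases t with
      | nil => simp at hx
      | cons b t' => cases t' with
        | nil => simp at hx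
        | cons c'' t'' => exact absurd rfl (hno a b c'' t'')

theorem pvDigit_cases (c : Char) (h : c.isDigit = true) :
    c ∈ ['0', '1', '2', '3', '4', '5', '6', '7', '8', '9'] := by
  simp only [Char.isDigit, Bool.and_eq_true, decide_eq_true_eq] at h
  obtain ⟨h1, h2⟩ := h
  have hofn : Char.ofNat c.toNat = c := Char.ofNat_toNat c
  have h1' : 48 ≤ c.toNat := UInt32.le_iff_toNat_le.mp h1
  have h2' : c.toNat ≤ 57 := UInt32.le_iff_toNat_le.mp h2
  set n := c.toNat with hn
  interval_cases n <;> rw [← hofn] <;> decide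

theorem pvDigit_mem_ten (c : Char) (h : c.isDigit = true) : c ∈ "9876543210".toList := by
  have h10 := pvDigit_cases c h
  fin_cases h10 <;> decide

theorem pvToChars_dval (c : Char) (h : c.isDigit = true) :
    PySem.Int.toChars (pvDval c) = [c] := by
  have h10 := pvDigit_cases c h
  fin_cases h10 <;> decide

theorem pvLoopB_eq (l : List Char) : ∀ ds, pvLoopB l ds =
    match (ds.filter (fun d => PySem.Chars.isIn [d, d, d] l)).head? with
    | none => ""
    | some d => String.ofList [d, d, d] := by
  intro ds
  induction ds with
  | nil => rfl
  | cons d ds ih =>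
    rw [pvLoopB, List.filter_cons]
    by_cases h : PySem.Chars.isIn [d, d, d] l <;> simp [h, ih]

theorem pvHead_filter_ge (ds : List Char) (hs : ds.Pairwise (fun x y => pvDval y ≤ pvDval x))
    (p : Char → Bool) (d₀ : Char) (h : (ds.filter p).head? = some d₀) :
    ∀ x ∈ ds, p x = true → pvDval x ≤ pvDval d₀ := by
  induction ds with
  | nil => simp at h
  | cons d ds ih =>
    rw [List.filter_cons] at h
    rcases List.pairwise_cons.mp hs with ⟨hd, hs'⟩
    by_cases hp : p d
    · rw [if_pos hp, List.head?_cons, Option.some.injEq] at h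
      subst h
      intro x hx hpx
      rcases List.mem_cons.mp hx with rfl | hx
      · exact le_refl _
      · exact hd x hx
    · rw [if_neg hp] at h
      intro x hx hpx
      rcases List.mem_cons.mp hx with rfl | hx
      · exact absurd hpx hp
      · exact ih hs' h x hx hpx

theorem pvFoldl_some (S : List Char) : ∀ r, S.foldl (fun r c => some (pvOmax r (pvDval c))) (some r)
    = some (S.foldl (fun r c => max r (pvDval c)) r) := by
  induction S with
  | nil => intro r; rfl
  | cons c S ih => intro r; simp only [List.foldl_cons, pvOmax]; exact ih _

theorem pvTen_pairwise : ("9876543210".toList).Pairwise (fun x y => pvDval y ≤ pvDval x) := by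
  decide

theorem largestGoodInteger_spec : Claim_equal_largestGoodInteger := by
  intro num _dom hpre
  unfold Spec_largestGoodInteger largestGoodInteger largestGoodInteger_alt
  rw [Pre_largestGoodInteger] at hpre
  rw [pvLoopA_eq_scan, pvScan_eq_foldl, pvLoopB_eq]
  set l := num.toList with hl
  have hdig : ∀ c ∈ pvTri l, c.isDigit = true := pvTri_digits l hpre
  cases hS : pvTri l with
  | nil =>
    have hfilt : ("9876543210".toList.filter (fun d => PySem.Chars.isIn [d, d, d] l)) = [] := by
      apply List.filter_eq_nil_iff.mpr
      intro d _ hcon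
      have : d ∈ pvTri l := (pvMem_tri_iff l d).mpr ((PySem.Chars.isIn_iff_infix _ _).mp hcon)
      rw [hS] at this
      simp at this
    rw [hfilt]
    rfl
  | cons s0 S' =>
    rw [List.foldl_cons]
    have h0 : (some (pvOmax none (pvDval s0)) : Option Int) = some (pvDval s0) := rfl
    rw [h0, pvFoldl_some]
    set M := S'.foldl (fun r c => max r (pvDval c)) (pvDval s0) with hM
    have hmax : PySem.List.max? (pvDval s0 :: S'.map pvDval) (fun y => y) = some M := by
      rw [PySem.List.max?_id_cons, hM, List.foldl_map]
    have hMmem : M ∈ pvDval s0 :: S'.map pvDval := PySem.List.max?_mem hmax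
    have hMisMax := PySem.List.max?_isMax hmax
    have hcmex : ∃ cm ∈ pvTri l, pvDval cm = M := by
      rcases List.mem_cons.mp hMmem with h | h
      · exact ⟨s0, by rw [hS]; exact List.mem_cons_self, h.symm⟩
      · obtain ⟨cm, hcm, hval⟩ := List.mem_map.mp h
        exact ⟨cm, by rw [hS]; exact List.mem_cons_of_mem _ hcm, hval⟩
    obtain ⟨cm, hcmS, hcmval⟩ := hcmex
    have hcmdig := hdig cm hcmS
    have hcmten := pvDigit_mem_ten cm hcmdig
    have hcmp : PySem.Chars.isIn [cm, cm, cm] l = true :=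
      (PySem.Chars.isIn_iff_infix _ _).mpr ((pvMem_tri_iff l cm).mp hcmS)
    cases hh : ("9876543210".toList.filter (fun d => PySem.Chars.isIn [d, d, d] l)).head? with
    | none =>
      exfalso
      have hmem : cm ∈ "9876543210".toList.filter (fun d => PySem.Chars.isIn [d, d, d] l) :=
        List.mem_filter.mpr ⟨hcmten, hcmp⟩
      rw [List.head?_eq_none_iff] at hh
      rw [hh] at hmem
      simp at hmem
    | some d0 =>
      have hd0mem : d0 ∈ "9876543210".toList.filter (fun d => PySem.Chars.isIn [d, d, d] l) :=
        List.mem_of_mem_head? (hh ▸ rfl)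
      obtain ⟨hd0ten, hd0p⟩ := List.mem_filter.mp hd0mem
      have hd0tri : d0 ∈ pvTri l := (pvMem_tri_iff l d0).mpr ((PySem.Chars.isIn_iff_infix _ _).mp hd0p)
      have hd0dig := hdig d0 hd0tri
      have h1 : pvDval d0 ≤ M := by
        apply hMisMax
        rw [hS] at hd0tri
        rcases List.mem_cons.mp hd0tri with rfl | hmem
        · exact List.mem_cons_self
        · exact List.mem_cons_of_mem _ (List.mem_map_of_mem hmem)
      have h2 : M ≤ pvDval d0 := by
        rw [← hcmval]
        exact pvHead_filter_ge "9876543210".toList pvTen_pairwise _ d0 hh cm hcmten hcmp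
      rw [show M = pvDval d0 from le_antisymm h2 h1]
      show String.ofList (PySem.Int.toChars (pvDval d0) ++ PySem.Int.toChars (pvDval d0) ++
        PySem.Int.toChars (pvDval d0)) = String.ofList [d0, d0, d0]
      rw [pvToChars_dval d0 hd0dig]
      rfl
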